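-- pv_equiv track=rewrite | github.com/avinashtr1/signalatlas | polymarket_engine/data_adapters/polymarket_adapter.py | _is_repetitive_live_family
-- ===== SOURCE A (Python) =====
-- def _is_repetitive_live_family(title: str) -> bool:
--     t = (title or "").lower()
--     bad_patterns = [
--         " by march",
--         " by april",
--         " by may",
--         " by june",
--         " by july",
--         " by august",
--         " by september",
--         " by october",
--         " by november",
--         " by december",
--         " before gta vi",
--         "out by...?",
--         " called by...?",
--         " held by...?",
--     ]
--     return any(x in t for x in bad_patterns)
-- ===== SOURCE B (Python) =====
-- _BAD_PATTERNS = (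
--     " by march",
--     " by april",
--     " by may",
--     " by june",
--     " by july",
--     " by august",
--     " by september",
--     " by october",
--     " by november",
--     " by december",
--     " before gta vi",
--     "out by...?",
--     " called by...?",
--     " held by...?",
-- )
--
--
-- def _is_repetitive_live_family(title: str) -> bool:
--     t = (title or "").lower()
--     return any(t.startswith(_BAD_PATTERNS, i) for i in range(len(t)))
-- ===== Notes on version B (the rewrite author's own statement) =====
-- stated objective: alternative
-- what changed: Instead of running 14 independent substring scans ('x in t' per pattern), B makes a single left-to-right pass over the title's positions and at each position tests all patterns anchored there via str.startswith with a tuple and an offset.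
import Mathlib
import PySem

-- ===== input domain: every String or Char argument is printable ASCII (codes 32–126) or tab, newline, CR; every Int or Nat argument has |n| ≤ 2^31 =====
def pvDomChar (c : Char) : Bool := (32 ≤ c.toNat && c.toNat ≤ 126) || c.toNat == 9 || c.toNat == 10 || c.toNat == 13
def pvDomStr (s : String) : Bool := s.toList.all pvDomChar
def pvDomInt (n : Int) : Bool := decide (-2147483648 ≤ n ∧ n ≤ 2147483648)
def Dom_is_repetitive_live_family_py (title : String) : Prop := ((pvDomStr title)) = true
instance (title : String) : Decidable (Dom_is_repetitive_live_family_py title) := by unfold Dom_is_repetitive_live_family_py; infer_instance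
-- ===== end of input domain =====

-- B replaces A's fourteen independent 'x in t' substring scans by one left-to-right pass over
-- the title's positions, testing all patterns anchored at each position (alternative decomposition).


-- ===== PORT A =====
-- the bad_patterns list of A (same literals, as char lists)
def pvBadPatterns : List (List Char) :=
  [" by march".toList, " by april".toList, " by may".toList, " by june".toList,
   " by july".toList, " by august".toList, " by september".toList, " by october".toList,
   " by november".toList, " by december".toList, " before gta vi".toList,
   "out by...?".toList, " called by...?".toList, " held by...?".toList]

def is_repetitive_live_family_py (title : String) : Bool :=
  -- t = (title or "").lower()  ('title or ""' is "" when title is empty, else title)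
  let t := PySem.Chars.lower (if title == "" then "".toList else title.toList)
  -- any(x in t for x in bad_patterns)
  pvBadPatterns.any (fun x => PySem.Chars.isIn x t)

-- ===== PORT B =====
-- B's loop 'any(t.startswith(_BAD_PATTERNS, i) for i in range(len(t)))' as structural
-- recursion over the suffixes of t (position i ↦ suffix t.drop i, i < len(t))
def pvScan (t : List Char) : Bool :=
  match t with
  | [] => false
  | _ :: rest => pvBadPatterns.any (fun p => PySem.Chars.startswith t p) || pvScan rest

def is_repetitive_live_family_py_alt (title : String) : Bool :=
  let t := PySem.Chars.lower (if title == "" then "".toList else title.toList)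
  pvScan t

-- ===== PRECONDITION & SPEC =====
def Spec_is_repetitive_live_family_py (title : String) (out : Bool) : Prop := out = is_repetitive_live_family_py_alt title
instance (title : String) (out : Bool) : Decidable (Spec_is_repetitive_live_family_py title out) := by unfold Spec_is_repetitive_live_family_py; infer_instance

-- ===== CLAIM (what is proved, stated in full; the proofs are below) =====
def Claim_equal_is_repetitive_live_family_py : Prop := ∀ (title : String), Dom_is_repetitive_live_family_py title → Spec_is_repetitive_live_family_py title (is_repetitive_live_family_py title)

-- ===== LEMMAS AND PROOFS =====
-- every pattern of A is nonempty (so a position scan over 0..len(t)-1 suffices)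
theorem pvBadPatterns_ne_nil : ∀ p ∈ pvBadPatterns, p ≠ [] := by decide

-- the position scan finds exactly the patterns that are prefixes of some suffix of t
theorem pvScan_iff (t : List Char) :
    pvScan t = true ↔ ∃ p ∈ pvBadPatterns, ∃ j, p <+: t.drop j := by
  induction t with
  | nil =>
    simp only [pvScan, List.drop_nil]
    constructor
    · intro h; exact absurd h (by decide)
    · rintro ⟨p, hp, j, hpre⟩
      exact absurd (List.prefix_nil.mp hpre) (pvBadPatterns_ne_nil p hp)
  | cons c rest ih =>
    simp only [pvScan, Bool.or_eq_true, List.any_eq_true, ih]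
    constructor
    · rintro (⟨p, hp, hsw⟩ | ⟨p, hp, j, hpre⟩)
      · exact ⟨p, hp, 0, by simpa using (PySem.Chars.startswith_iff _ _).mp hsw⟩
      · exact ⟨p, hp, j + 1, by simpa using hpre⟩
    · rintro ⟨p, hp, j, hpre⟩
      cases j with
      | zero => exact Or.inl ⟨p, hp, (PySem.Chars.startswith_iff _ _).mpr (by simpa using hpre)⟩
      | succ j => exact Or.inr ⟨p, hp, j, by simpa using hpre⟩

-- ===== VERDICT (by name: the statement is the Claim_ definition above) =====
theorem is_repetitive_live_family_py_spec : Claim_equal_is_repetitive_live_family_py := by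
  intro title _
  unfold Spec_is_repetitive_live_family_py is_repetitive_live_family_py is_repetitive_live_family_py_alt
  set t := PySem.Chars.lower (if title == "" then "".toList else title.toList) with ht
  have : (pvBadPatterns.any (fun x => PySem.Chars.isIn x t) = true) ↔ (pvScan t = true) := by
    rw [pvScan_iff, List.any_eq_true]
    constructor
    · rintro ⟨p, hp, hin⟩
      obtain ⟨j, hj⟩ := (PySem.Chars.exists_prefix_drop_iff_isIn p t).mpr hin
      exact ⟨p, hp, j, hj⟩
    · rintro ⟨p, hp, j, hj⟩
      exact ⟨p, hp, (PySem.Chars.exists_prefix_drop_iff_isIn p t).mp ⟨j, hj⟩⟩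
  exact (Bool.eq_iff_iff.mpr this)
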